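-- pv_equiv track=rewrite | github.com/linhbqd123-ops/docpilot | packages/core-engine/agents/turn_orchestrator.py | _increment_tool_usage_counts
-- ===== SOURCE A (Python) =====
-- from typing import Any, AsyncIterator
--
-- _AGENT_TOOL_SPECS: dict[str, dict[str, Any]] = {
--     "get_session_summary": {
--         "tier": "light",
--         "supports_parallel": True,
--         "max_calls_per_turn": 2,
--         "estimated_result_tokens": 140,
--         "guidance": "Load session state, filename, and current revision id before heavier planning.",
--     },
--     "answer_about_document": {
--         "tier": "medium",
--         "supports_parallel": False,
--         "max_calls_per_turn": 2,
--         "estimated_result_tokens": 520,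
--         "guidance": "Use semantic/snippet retrieval when you need topical document evidence for a question.",
--     },
--     "inspect_document": {
--         "tier": "light",
--         "supports_parallel": True,
--         "max_calls_per_turn": 2,
--         "estimated_result_tokens": 260,
--         "guidance": "Inspect outline, sections, and style usage when structure matters.",
--     },
--     "locate_relevant_context": {
--         "tier": "medium",
--         "supports_parallel": False,
--         "max_calls_per_turn": 3,
--         "estimated_result_tokens": 480,
--         "guidance": "Find block ids or likely targets for edits and follow up with context windows.",
--     },
--     "get_context_window": {
--         "tier": "light",
--         "supports_parallel": True,
--         "max_calls_per_turn": 4,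
--         "estimated_result_tokens": 360,
--         "guidance": "Fetch a local neighborhood around a known block id.",
--     },
--     "get_source_html": {
--         "tier": "heavy",
--         "supports_parallel": False,
--         "max_calls_per_turn": 1,
--         "estimated_result_tokens": 1800,
--         "guidance": "Use only when fidelity to exact source structure or formatting is required.",
--     },
--     "get_analysis_html": {
--         "tier": "heavy",
--         "supports_parallel": False,
--         "max_calls_per_turn": 1,
--         "estimated_result_tokens": 1200,
--         "guidance": "Use when compact analysis HTML is sufficient and cheaper tools were not enough.",
--     },
-- }
--
-- def _increment_tool_usage_counts(tool_usage_counts: dict[str, int], tool_calls: list[dict[str, Any]]) -> int: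
--     heavy_calls_added = 0
--     for tool_call in tool_calls:
--         tool_name = str(tool_call.get("tool_name") or "").strip()
--         if not tool_name:
--             continue
--         tool_usage_counts[tool_name] = tool_usage_counts.get(tool_name, 0) + 1
--         if _AGENT_TOOL_SPECS.get(tool_name, {}).get("tier") == "heavy":
--             heavy_calls_added += 1
--     return heavy_calls_added
-- ===== SOURCE B (Python) =====
-- from typing import Any
--
-- _AGENT_TOOL_SPECS: dict[str, dict[str, Any]] = {
--     "get_session_summary": {"tier": "light", "supports_parallel": True, "max_calls_per_turn": 2, "estimated_result_tokens": 140, "guidance": "Load session state, filename, and current revision id before heavier planning."},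
--     "answer_about_document": {"tier": "medium", "supports_parallel": False, "max_calls_per_turn": 2, "estimated_result_tokens": 520, "guidance": "Use semantic/snippet retrieval when you need topical document evidence for a question."},
--     "inspect_document": {"tier": "light", "supports_parallel": True, "max_calls_per_turn": 2, "estimated_result_tokens": 260, "guidance": "Inspect outline, sections, and style usage when structure matters."},
--     "locate_relevant_context": {"tier": "medium", "supports_parallel": False, "max_calls_per_turn": 3, "estimated_result_tokens": 480, "guidance": "Find block ids or likely targets for edits and follow up with context windows."},
--     "get_context_window": {"tier": "light", "supports_parallel": True, "max_calls_per_turn": 4, "estimated_result_tokens": 360, "guidance": "Fetch a local neighborhood around a known block id."},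
--     "get_source_html": {"tier": "heavy", "supports_parallel": False, "max_calls_per_turn": 1, "estimated_result_tokens": 1800, "guidance": "Use only when fidelity to exact source structure or formatting is required."},
--     "get_analysis_html": {"tier": "heavy", "supports_parallel": False, "max_calls_per_turn": 1, "estimated_result_tokens": 1200, "guidance": "Use when compact analysis HTML is sufficient and cheaper tools were not enough."},
-- }
--
--
-- def _increment_tool_usage_counts(tool_usage_counts, tool_calls):
--     # Phase 1: collect the valid (non-empty after strip) tool names.
--     names = [n for n in (str(tc.get("tool_name") or "").strip() for tc in tool_calls) if n]
--     # Phase 2: tally them once.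
--     tally = {}
--     for n in names:
--         tally[n] = tally.get(n, 0) + 1
--     # Phase 3: merge the tally into the live counts dict.
--     for name, count in tally.items():
--         tool_usage_counts[name] = tool_usage_counts.get(name, 0) + count
--     # Phase 4: heavy calls = sum of tallies of heavy-tier tools.
--     return sum(c for n, c in tally.items()
--                if _AGENT_TOOL_SPECS.get(n, {}).get("tier") == "heavy")
-- ===== Notes on version B (the rewrite author's own statement) =====
-- stated objective: idiomatic
-- what changed: Replaces A's single interleaved per-call increment-and-check loop by a group-then-merge decomposition: filter valid names with a comprehension, tally them once into a dict, merge the tally into tool_usage_counts, and compute heavy_calls_added as a separate sum over the tally's heavy-tier entries.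
import Mathlib
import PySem

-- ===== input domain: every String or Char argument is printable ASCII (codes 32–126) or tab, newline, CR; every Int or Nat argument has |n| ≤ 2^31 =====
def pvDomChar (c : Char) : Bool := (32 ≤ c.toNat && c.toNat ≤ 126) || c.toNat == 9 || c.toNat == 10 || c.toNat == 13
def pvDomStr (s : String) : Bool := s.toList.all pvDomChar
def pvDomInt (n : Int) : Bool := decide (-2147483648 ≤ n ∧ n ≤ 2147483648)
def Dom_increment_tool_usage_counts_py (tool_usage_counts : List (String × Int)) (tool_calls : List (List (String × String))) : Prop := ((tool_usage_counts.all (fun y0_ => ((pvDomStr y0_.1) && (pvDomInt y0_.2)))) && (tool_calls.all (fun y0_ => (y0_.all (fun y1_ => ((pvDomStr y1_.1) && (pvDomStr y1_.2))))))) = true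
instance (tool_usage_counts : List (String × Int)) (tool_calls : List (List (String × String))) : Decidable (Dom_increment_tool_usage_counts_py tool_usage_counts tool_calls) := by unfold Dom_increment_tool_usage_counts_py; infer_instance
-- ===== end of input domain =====

-- B replaces A's interleaved increment-and-check loop by a filter/tally/merge/sum decomposition
-- (idiomatic, same cost). A mutates tool_usage_counts in place; B performs the same mutation
-- (lookup-equivalent dict); the equivalence proved here is about the RETURN value only.

-- tier of each tool in the module constant _AGENT_TOOL_SPECS (only the "tier" field matters here)
def pvSpecTier : PySem.Dict String String := PySem.Dict.ofList
  [("get_session_summary", "light"), ("answer_about_document", "medium"),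
   ("inspect_document", "light"), ("locate_relevant_context", "medium"),
   ("get_context_window", "light"), ("get_source_html", "heavy"), ("get_analysis_html", "heavy")]

-- ===== PORT A =====
-- str(tool_call.get("tool_name") or "").strip(): a missing key and an empty value both give ""
def pvNameOf (tc : List (String × String)) : String :=
  PySem.Str.strip (((PySem.Dict.mk tc).get? "tool_name").getD "")

def increment_tool_usage_counts_py (tool_usage_counts : List (String × Int)) (tool_calls : List (List (String × String))) : Int :=
  (tool_calls.foldl
    (fun (st : PySem.Dict String Int × Int) tool_call =>
      let tool_name := pvNameOf tool_call
      if tool_name = "" then st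
      else
        (st.1.insert tool_name (st.1.getD tool_name 0 + 1),
         if pvSpecTier.get? tool_name = some "heavy" then st.2 + 1 else st.2))
    (PySem.Dict.ofList tool_usage_counts, 0)).2

-- ===== PORT B =====
def increment_tool_usage_counts_py_alt (tool_usage_counts : List (String × Int)) (tool_calls : List (List (String × String))) : Int :=
  -- Phase 1: valid names
  let names := tool_calls.filterMap (fun tc =>
    let n := pvNameOf tc
    if n = "" then none else some n)
  -- Phase 2: tally
  let tally := names.foldl (fun d n => d.insert n (d.getD n 0 + 1)) PySem.Dict.empty
  -- Phase 3: merge into the live counts (mutation in Python; return value unused)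
  let _merged := tally.items.foldl
    (fun (d : PySem.Dict String Int) p => d.insert p.1 (d.getD p.1 0 + p.2))
    (PySem.Dict.ofList tool_usage_counts)
  -- Phase 4: sum of heavy-tier tallies
  (tally.items.filter (fun p => decide (pvSpecTier.get? p.1 = some "heavy"))).foldl
    (fun s p => s + p.2) 0

-- ===== PRECONDITION & SPEC =====
def Spec_increment_tool_usage_counts_py (tool_usage_counts : List (String × Int)) (tool_calls : List (List (String × String))) (out : Int) : Prop := out = increment_tool_usage_counts_py_alt tool_usage_counts tool_calls
instance (tool_usage_counts : List (String × Int)) (tool_calls : List (List (String × String))) (out : Int) : Decidable (Spec_increment_tool_usage_counts_py tool_usage_counts tool_calls out) := by unfold Spec_increment_tool_usage_counts_py; infer_instance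

-- ===== CLAIM (what is proved, stated in full; the proofs are below) =====
def Claim_equal_increment_tool_usage_counts_py : Prop := ∀ (tool_usage_counts : List (String × Int)) (tool_calls : List (List (String × String))), Dom_increment_tool_usage_counts_py tool_usage_counts tool_calls → Spec_increment_tool_usage_counts_py tool_usage_counts tool_calls (increment_tool_usage_counts_py tool_usage_counts tool_calls)

-- ===== LEMMAS AND PROOFS =====

-- abbreviation used only by the proofs: B's phase-1 name list
def pvNames (tcs : List (List (String × String))) : List String :=
  tcs.filterMap (fun tc =>
    let n := pvNameOf tc
    if n = "" then none else some n)

def pvHeavyB (n : String) : Bool := decide (pvSpecTier.get? n = some "heavy")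

lemma pvNames_cons (tc : List (String × String)) (tcs : List (List (String × String))) :
    pvNames (tc :: tcs)
    = if pvNameOf tc = "" then pvNames tcs else pvNameOf tc :: pvNames tcs := by
  by_cases h : pvNameOf tc = "" <;> simp [pvNames, h]

-- A's loop counts the heavy names among the valid names, whatever the dict state is
lemma pvA_loop (tcs : List (List (String × String))) :
    ∀ (d : PySem.Dict String Int) (acc : Int),
    (tcs.foldl
      (fun (st : PySem.Dict String Int × Int) tool_call =>
        let tool_name := pvNameOf tool_call
        if tool_name = "" then st
        else
          (st.1.insert tool_name (st.1.getD tool_name 0 + 1),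
           if pvSpecTier.get? tool_name = some "heavy" then st.2 + 1 else st.2))
      (d, acc)).2
    = acc + ((pvNames tcs).countP pvHeavyB : Int) := by
  induction tcs with
  | nil => intro d acc; simp [pvNames]
  | cons tc tcs ih =>
    intro d acc
    by_cases h : pvNameOf tc = ""
    · simp [h, pvNames_cons, ih]
    · by_cases hh : pvSpecTier.get? (pvNameOf tc) = some "heavy" <;>
        · simp [h, hh, pvNames_cons, ih, pvHeavyB]
          try omega

-- summing the second components of the kept pairs, via the ite form
lemma pvSum_ite (P : String → Bool) (f : String → Int) (l : List String) :
    ((l.map (fun k => (k, f k))).filter (fun p => P p.1)).foldl (fun s p => s + p.2) 0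
    = (l.map (fun k => if P k then f k else 0)).sum := by
  rw [PySem.List.foldl_add, zero_add]
  induction l with
  | nil => simp
  | cons x l ih => by_cases h : P x <;> simp [h, ih]

-- on a nodup list containing x, the one-point ite sum picks out c x
lemma pvSum_single (l : List String) (hnd : l.Nodup) (x : String) (hx : x ∈ l) (c : String → Int) :
    (l.map (fun k => if k = x then c k else 0)).sum = c x := by
  induction l with
  | nil => cases hx
  | cons y l ih =>
    by_cases hxy : x = y
    · subst hxy
      have hnot : x ∉ l := (List.nodup_cons.mp hnd).1
      have hz : ∀ k ∈ l, (if k = x then c k else 0) = (fun _ : String => (0:Int)) k := by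
        intro k hk
        have hne : k ≠ x := by rintro rfl; exact hnot hk
        simp [hne]
      simp only [List.map_cons, List.sum_cons, if_pos]
      rw [List.map_congr_left hz]
      simp
    · have hx' : x ∈ l := (List.mem_cons.mp hx).resolve_left hxy
      have hyx : ¬ (y = x) := fun h => hxy h.symm
      simp [hyx, ih (List.nodup_cons.mp hnd).2 hx']

-- Σ over the distinct keys of the heavy tallies = the heavy count of the raw name list
lemma pvSum_counts (P : String → Bool) (l names : List String)
    (hnd : l.Nodup) (hcov : ∀ x ∈ names, x ∈ l) :
    (l.map (fun k => if P k then (names.count k : Int) else 0)).sum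
    = (names.countP P : Int) := by
  induction names with
  | nil => simp
  | cons x ns ih =>
    have hx : x ∈ l := hcov x (List.mem_cons_self ..)
    have hcov' : ∀ y ∈ ns, y ∈ l := fun y hy => hcov y (List.mem_cons_of_mem _ hy)
    have hsplit : (l.map (fun k => if P k then ((x :: ns).count k : Int) else 0)).sum
        = (l.map (fun k => if P k then (ns.count k : Int) else 0)).sum
          + (l.map (fun k => if k = x then (if P k then (1:Int) else 0) else 0)).sum := by
      rw [← List.sum_map_add]
      refine congrArg List.sum (List.map_congr_left fun k _ => ?_)
      by_cases hk : k = x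
      · subst hk
        by_cases hP : P k <;> simp [hP]
      · have hxk : ¬ x = k := fun h => hk h.symm
        simp [hk, hxk]
    rw [hsplit, ih hcov', pvSum_single l hnd x hx]
    by_cases hP : P x <;>
      · simp [hP]
        try omega

-- ===== VERDICT (by name: the statement is the Claim_ definition above) =====
theorem increment_tool_usage_counts_py_spec : Claim_equal_increment_tool_usage_counts_py := by
  intro tuc tcs _dom
  unfold Spec_increment_tool_usage_counts_py
  have hA : increment_tool_usage_counts_py tuc tcs = ((pvNames tcs).countP pvHeavyB : Int) := by
    unfold increment_tool_usage_counts_py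
    rw [pvA_loop, zero_add]
  have hB : increment_tool_usage_counts_py_alt tuc tcs
      = ((pvNames tcs).countP pvHeavyB : Int) := by
    simp only [increment_tool_usage_counts_py_alt]
    rw [PySem.Dict.foldl_insert_getD_add_one_eq_counter, PySem.Dict.items_counter]
    rw [show (List.filterMap (fun x => if pvNameOf x = "" then none else some (pvNameOf x)) tcs)
        = pvNames tcs from rfl]
    rw [show (fun p : String × Int => decide (pvSpecTier.get? p.1 = some "heavy"))
        = (fun p : String × Int => pvHeavyB p.1) from rfl]
    rw [pvSum_ite pvHeavyB (fun k => ((pvNames tcs).count k : Int)) (PySem.Set.ofList (pvNames tcs))]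
    exact pvSum_counts pvHeavyB (PySem.Set.ofList (pvNames tcs)) (pvNames tcs)
      (PySem.Set.nodup_ofList (pvNames tcs))
      (fun x hx => (PySem.Set.mem_ofList ..).mpr hx)
  rw [hA, hB]
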